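-- pv_equiv track=rewrite | github.com/Sh3nm/DES-Implementation | des.py | des_encrypt_text
-- ===== SOURCE A (Python) =====
-- from itertools import cycle
--
-- def text_to_bits(text):
--     return ''.join(f'{ord(c):08b}' for c in text)
--
-- def xor(a, b):
--     return ''.join('1' if i != j else '0' for i, j in zip(a, b))
--
-- def permute(bits, table):
--     return ''.join(bits[i-1] for i in table)
--
-- def pad_to_64_bits(bits):
--     while len(bits) % 64 != 0:
--         bits += '0'
--     return bits
--
-- IP = [58, 50, 42, 34, 26, 18, 10, 2,
--       60, 52, 44, 36, 28, 20, 12, 4,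
--       62, 54, 46, 38, 30, 22, 14, 6,
--       64, 56, 48, 40, 32, 24, 16, 8,
--       57, 49, 41, 33, 25, 17, 9,  1,
--       59, 51, 43, 35, 27, 19, 11, 3,
--       61, 53, 45, 37, 29, 21, 13, 5,
--       63, 55, 47, 39, 31, 23, 15, 7]
--
-- FP = [40, 8, 48, 16, 56, 24, 64, 32,
--       39, 7, 47, 15, 55, 23, 63, 31,
--       38, 6, 46, 14, 54, 22, 62, 30,
--       37, 5, 45, 13, 53, 21, 61, 29,
--       36, 4, 44, 12, 52, 20, 60, 28,
--       35, 3, 43, 11, 51, 19, 59, 27,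
--       34, 2, 42, 10, 50, 18, 58, 26,
--       33, 1, 41, 9, 49, 17, 57, 25]
--
-- E = [32, 1, 2, 3, 4, 5, 4, 5, 6, 7, 8, 9,
--      8, 9, 10, 11, 12, 13, 12, 13, 14, 15, 16, 17,
--      16, 17, 18, 19, 20, 21, 20, 21, 22, 23, 24, 25,
--      24, 25, 26, 27, 28, 29, 28, 29, 30, 31, 32, 1]
--
-- S_BOX = [
--     [
--         [14,4,13,1,2,15,11,8,3,10,6,12,5,9,0,7],
--         [0,15,7,4,14,2,13,1,10,6,12,11,9,5,3,8],
--         [4,1,14,8,13,6,2,11,15,12,9,7,3,10,5,0],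
--         [15,12,8,2,4,9,1,7,5,11,3,14,10,0,6,13],
--     ]
-- ] * 8
--
-- def sbox_substitution(bits):
--     output = ''
--     for i in range(8):
--         block = bits[i*6:(i+1)*6]
--         row = int(block[0] + block[5], 2)
--         col = int(block[1:5], 2)
--         val = S_BOX[i][row][col]
--         output += f'{val:04b}'
--     return output
--
-- def feistel(right, key):
--     expanded = permute(right, E)
--     temp = xor(expanded, key)
--     substituted = sbox_substitution(temp)
--     return substituted  # skip P-box for simplicity
--
-- def generate_subkeys(key_bits):
--     subkeys = []
--     key_cycle = cycle(key_bits)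
--     for i in range(16):
--         subkeys.append(''.join(next(key_cycle) for _ in range(48)))
--     return subkeys
--
-- def des_encrypt_block(block, key_bits):
--     block = permute(block, IP)
--     L, R = block[:32], block[32:]
--     subkeys = generate_subkeys(key_bits)
--
--     for i in range(16):
--         new_L = R
--         new_R = xor(L, feistel(R, subkeys[i]))
--         L, R = new_L, new_R
--
--     cipher_block = permute(R + L, FP)
--     return cipher_block
--
-- def des_encrypt_text(plaintext, key):
--     plaintext_bits = pad_to_64_bits(text_to_bits(plaintext))
--     key_bits = text_to_bits(key)
--     cipher_bits = ''
--
--     for i in range(0, len(plaintext_bits), 64):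
--         block = plaintext_bits[i:i+64]
--         cipher_bits += des_encrypt_block(block, key_bits)
--
--     return hex(int(cipher_bits, 2))[2:].zfill(len(cipher_bits)//4)
-- ===== SOURCE B (Python) =====
-- # Integer-based reimplementation: blocks, subkeys and round values are Python
-- # ints with explicit bit widths instead of '0'/'1' strings.
--
-- IP = [58, 50, 42, 34, 26, 18, 10, 2,
--       60, 52, 44, 36, 28, 20, 12, 4,
--       62, 54, 46, 38, 30, 22, 14, 6,
--       64, 56, 48, 40, 32, 24, 16, 8,
--       57, 49, 41, 33, 25, 17, 9,  1,
--       59, 51, 43, 35, 27, 19, 11, 3,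
--       61, 53, 45, 37, 29, 21, 13, 5,
--       63, 55, 47, 39, 31, 23, 15, 7]
--
-- FP = [40, 8, 48, 16, 56, 24, 64, 32,
--       39, 7, 47, 15, 55, 23, 63, 31,
--       38, 6, 46, 14, 54, 22, 62, 30,
--       37, 5, 45, 13, 53, 21, 61, 29,
--       36, 4, 44, 12, 52, 20, 60, 28,
--       35, 3, 43, 11, 51, 19, 59, 27,
--       34, 2, 42, 10, 50, 18, 58, 26,
--       33, 1, 41, 9, 49, 17, 57, 25]
--
-- E = [32, 1, 2, 3, 4, 5, 4, 5, 6, 7, 8, 9,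
--      8, 9, 10, 11, 12, 13, 12, 13, 14, 15, 16, 17,
--      16, 17, 18, 19, 20, 21, 20, 21, 22, 23, 24, 25,
--      24, 25, 26, 27, 28, 29, 28, 29, 30, 31, 32, 1]
--
-- # the source uses this single box for all eight S-box positions
-- SBOX = [
--     [14, 4, 13, 1, 2, 15, 11, 8, 3, 10, 6, 12, 5, 9, 0, 7],
--     [0, 15, 7, 4, 14, 2, 13, 1, 10, 6, 12, 11, 9, 5, 3, 8],
--     [4, 1, 14, 8, 13, 6, 2, 11, 15, 12, 9, 7, 3, 10, 5, 0],
--     [15, 12, 8, 2, 4, 9, 1, 7, 5, 11, 3, 14, 10, 0, 6, 13],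
-- ]
--
--
-- def permute_int(v, width, table):
--     r = 0
--     for p in table:
--         r = r * 2 + ((v >> (width - p)) & 1)
--     return r
--
--
-- def sbox_int(v48):
--     out = 0
--     for i in range(8):
--         g = (v48 >> (42 - 6 * i)) & 0x3F
--         row = ((g >> 5) & 1) * 2 + (g & 1)
--         col = (g >> 1) & 0xF
--         out = out * 16 + SBOX[row][col]
--     return out
--
--
-- def feistel_int(r, subkey):
--     return sbox_int(permute_int(r, 32, E) ^ subkey)
--
--
-- def encrypt_block_int(block, subkeys):
--     v = permute_int(block, 64, IP)
--     L, R = v >> 32, v & 0xFFFFFFFF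
--     for k in subkeys:
--         L, R = R, L ^ feistel_int(R, k)
--     return permute_int(R * (1 << 32) + L, 64, FP)
--
--
-- def des_encrypt_text(plaintext, key):
--     key_bits = [(ord(c) >> (7 - t)) & 1 for c in key for t in range(8)]
--     n = len(key_bits)
--     subkeys = []
--     for j in range(16):
--         k = 0
--         for t in range(48):
--             k = k * 2 + key_bits[(48 * j + t) % n]
--         subkeys.append(k)
--
--     data = [ord(c) for c in plaintext]
--     data += [0] * (-len(data) % 8)
--
--     out = []
--     for i in range(0, len(data), 8):
--         block = 0
--         for byte in data[i:i + 8]: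
--             block = block * 256 + byte
--         out.append(format(encrypt_block_int(block, subkeys), '016x'))
--     return ''.join(out)
-- ===== Notes on version B (the rewrite author's own statement) =====
-- stated objective: alternative
-- what changed: B replaces the '0'/'1'-string pipeline by integer bit arithmetic: blocks, subkeys and round values are ints with explicit widths, permutation/expansion are shift-and-mask loops, XOR is the native ^, the S-box input groups are extracted with shifts, the subkey stream is modular indexing into a bit list instead of itertools.cycle, subkeys are computed once instead of once per block, and each 64-bit block is emitted directly as 16 hex digits instead of one big int('...',2)/hex round-trip.
import Mathlib
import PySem

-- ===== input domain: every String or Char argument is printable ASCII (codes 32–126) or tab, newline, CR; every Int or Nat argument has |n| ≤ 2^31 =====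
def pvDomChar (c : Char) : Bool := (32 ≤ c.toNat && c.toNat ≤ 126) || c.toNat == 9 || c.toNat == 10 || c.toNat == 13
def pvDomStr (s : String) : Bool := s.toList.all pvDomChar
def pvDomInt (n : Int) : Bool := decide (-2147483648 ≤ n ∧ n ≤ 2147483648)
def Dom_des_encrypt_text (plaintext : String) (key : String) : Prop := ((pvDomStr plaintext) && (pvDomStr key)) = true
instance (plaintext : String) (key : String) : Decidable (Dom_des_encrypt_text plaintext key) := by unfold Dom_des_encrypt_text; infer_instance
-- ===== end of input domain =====

-- B re-implements the DES-like encryption on integers: blocks, subkeys and round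
-- values are bit-fields handled with shifts/masks instead of '0'/'1' strings, the
-- key stream is modular indexing instead of itertools.cycle, subkeys are computed
-- once rather than per block, and each block is emitted as 16 hex digits directly.

-- ===== PORT A =====
-- A works on '0'/'1' bit strings; the port works on List Char via String.toList.
-- DES tables (module constants of Source A)
def pvIP : List Nat := [58, 50, 42, 34, 26, 18, 10, 2, 60, 52, 44, 36, 28, 20, 12, 4,
  62, 54, 46, 38, 30, 22, 14, 6, 64, 56, 48, 40, 32, 24, 16, 8,
  57, 49, 41, 33, 25, 17, 9, 1, 59, 51, 43, 35, 27, 19, 11, 3,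
  61, 53, 45, 37, 29, 21, 13, 5, 63, 55, 47, 39, 31, 23, 15, 7]

def pvFP : List Nat := [40, 8, 48, 16, 56, 24, 64, 32, 39, 7, 47, 15, 55, 23, 63, 31,
  38, 6, 46, 14, 54, 22, 62, 30, 37, 5, 45, 13, 53, 21, 61, 29,
  36, 4, 44, 12, 52, 20, 60, 28, 35, 3, 43, 11, 51, 19, 59, 27,
  34, 2, 42, 10, 50, 18, 58, 26, 33, 1, 41, 9, 49, 17, 57, 25]

def pvE : List Nat := [32, 1, 2, 3, 4, 5, 4, 5, 6, 7, 8, 9,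
  8, 9, 10, 11, 12, 13, 12, 13, 14, 15, 16, 17,
  16, 17, 18, 19, 20, 21, 20, 21, 22, 23, 24, 25,
  24, 25, 26, 27, 28, 29, 28, 29, 30, 31, 32, 1]

def pvSBOXbox : List (List Nat) :=
  [[14, 4, 13, 1, 2, 15, 11, 8, 3, 10, 6, 12, 5, 9, 0, 7],
   [0, 15, 7, 4, 14, 2, 13, 1, 10, 6, 12, 11, 9, 5, 3, 8],
   [4, 1, 14, 8, 13, 6, 2, 11, 15, 12, 9, 7, 3, 10, 5, 0],
   [15, 12, 8, 2, 4, 9, 1, 7, 5, 11, 3, 14, 10, 0, 6, 13]]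

-- S_BOX = [box] * 8
def pvSBOX : List (List (List Nat)) := List.replicate 8 pvSBOXbox

-- int(s, 2): exact for the nonempty strings of '0'/'1' digits A passes to it
def pvBitsToNat (s : List Char) : Nat :=
  s.foldl (fun a c => 2 * a + (if c = '1' then 1 else 0)) 0

-- f'{n:08b}' for n >= 0 is format(n, 'b') left-padded with '0' to width 8
def pvTextToBits (t : List Char) : List Char :=
  t.flatMap (fun c => PySem.Chars.zfill (PySem.Int.toBinChars (c.toNat : Int)) 8)

def pvXorA (a b : List Char) : List Char :=
  (a.zip b).map (fun p => if p.1 ≠ p.2 then '1' else '0')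

-- bits[i-1]: in range for every call A makes (table entries are 1-based positions)
def pvPermuteA (bits : List Char) (table : List Nat) : List Char :=
  table.map (fun i => bits.getD (i - 1) '0')

-- while len(bits) % 64 != 0: bits += '0'
def pvPad64 (bits : List Char) : List Char :=
  if bits.length % 64 ≠ 0 then pvPad64 (bits ++ ['0']) else bits
termination_by (64 - bits.length % 64) % 64
decreasing_by simp only [List.length_append, List.length_cons, List.length_nil]; omega

def pvSboxA (bits : List Char) : List Char :=
  (List.range 8).foldl (fun output i =>
    let block := PySem.List.slice bits (some ((i * 6 : Nat) : Int)) (some (((i + 1) * 6 : Nat) : Int))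
    let row := pvBitsToNat [block.getD 0 '0', block.getD 5 '0']
    let col := pvBitsToNat (PySem.List.slice block (some 1) (some 5))
    let val := ((pvSBOX.getD i []).getD row []).getD col 0
    output ++ PySem.Chars.zfill (PySem.Int.toBinChars (val : Int)) 4) []

def pvFeistelA (right key : List Char) : List Char :=
  pvSboxA (pvXorA (pvPermuteA right pvE) key)

-- ''.join(next(key_cycle) for _ in range(n)); itertools.cycle modeled as a
-- position in key_bits advancing mod its length (exact for nonempty key_bits)
def pvDraw (kb : List Char) (pos : Nat) : Nat → List Char × Nat
  | 0 => ([], pos)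
  | n + 1 =>
    let c := kb.getD pos '0'
    let r := pvDraw kb ((pos + 1) % kb.length) n
    (c :: r.1, r.2)

def pvGenSubkeysA (kb : List Char) : List (List Char) :=
  ((List.range 16).foldl (fun st _ =>
    let d := pvDraw kb st.2 48
    (st.1 ++ [d.1], d.2)) (([], 0) : List (List Char) × Nat)).1

def pvEncBlockA (block kb : List Char) : List Char :=
  let b := pvPermuteA block pvIP
  let L := PySem.List.slice b none (some 32)
  let R := PySem.List.slice b (some 32) none
  let sk := pvGenSubkeysA kb
  let p := (List.range 16).foldl
    (fun LR i => (LR.2, pvXorA LR.1 (pvFeistelA LR.2 (sk.getD i [])))) (L, R)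
  pvPermuteA (p.2 ++ p.1) pvFP

-- hex(n)[2:] for n >= 0 (lowercase hex digits, no prefix); also format(n, 'x')
def pvHexDigit (n : Nat) : Char := Char.ofNat (if n < 10 then 48 + n else 87 + n)

def pvHexRepr (n : Nat) : List Char :=
  if n < 16 then [pvHexDigit n] else pvHexRepr (n / 16) ++ [pvHexDigit (n % 16)]
decreasing_by exact Nat.div_lt_self (by omega) (by omega)

def des_encrypt_text (plaintext : String) (key : String) : String :=
  let plaintext_bits := pvPad64 (pvTextToBits plaintext.toList)
  let key_bits := pvTextToBits key.toList
  let cipher_bits := (PySem.List.pyRange 0 (plaintext_bits.length : Int) 64).foldl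
    (fun cb i => cb ++ pvEncBlockA (PySem.List.slice plaintext_bits (some i) (some (i + 64))) key_bits) []
  -- len(cipher_bits) // 4 on a Nat length is Nat division
  String.ofList (PySem.Chars.zfill (pvHexRepr (pvBitsToNat cipher_bits)) ((cipher_bits.length / 4 : Nat) : Int))

-- ===== PORT B =====
-- Source B works on Python ints with explicit widths; the port uses Nat.
def pvPermuteB (v : Nat) (width : Nat) (table : List Nat) : Nat :=
  table.foldl (fun r p => r * 2 + ((v >>> (width - p)) &&& 1)) 0

def pvSboxB (v48 : Nat) : Nat :=
  (List.range 8).foldl (fun out i =>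
    let g := (v48 >>> (42 - 6 * i)) &&& 0x3F
    let row := ((g >>> 5) &&& 1) * 2 + (g &&& 1)
    let col := (g >>> 1) &&& 0xF
    out * 16 + (pvSBOXbox.getD row []).getD col 0) 0

def pvFeistelB (r subkey : Nat) : Nat := pvSboxB (pvPermuteB r 32 pvE ^^^ subkey)

def pvEncBlockB (block : Nat) (subkeys : List Nat) : Nat :=
  let v := pvPermuteB block 64 pvIP
  let st := subkeys.foldl (fun LR k => (LR.2, LR.1 ^^^ pvFeistelB LR.2 k)) (v >>> 32, v &&& 0xFFFFFFFF)
  pvPermuteB (st.2 * (1 <<< 32) + st.1) 64 pvFP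

def des_encrypt_text_alt (plaintext : String) (key : String) : String :=
  let key_bits := key.toList.flatMap (fun c => (List.range 8).map (fun t => (c.toNat >>> (7 - t)) &&& 1))
  let n := key_bits.length
  -- key_bits[(48*j + t) % n]: the index is in range whenever n > 0
  let subkeys := (List.range 16).foldl (fun sks j =>
    sks ++ [(List.range 48).foldl (fun k t => k * 2 + key_bits.getD ((48 * j + t) % n) 0) 0]) []
  let data0 := plaintext.toList.map (fun c => c.toNat)
  -- data += [0] * (-len(data) % 8)
  let data := data0 ++ List.replicate (PySem.Int.mod (-(data0.length : Int)) 8).toNat 0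
  -- format(v, '016x') = format(v, 'x') left-padded with '0' to width 16
  let out := (PySem.List.pyRange 0 (data.length : Int) 8).foldl (fun out i =>
    out ++ [PySem.Chars.zfill (pvHexRepr (pvEncBlockB
      ((PySem.List.slice data (some i) (some (i + 8))).foldl (fun b y => b * 256 + y) 0) subkeys)) 16]) []
  String.ofList (PySem.Chars.join [] out)

-- ===== PRECONDITION & SPEC =====
-- A raises on an empty plaintext (int('', 2), ValueError) and on an empty key with a
-- nonempty plaintext (exhausted itertools.cycle, RuntimeError); Pre_ excludes exactly those.
def Pre_des_encrypt_text (plaintext : String) (key : String) : Prop :=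
  plaintext.toList ≠ [] ∧ key.toList ≠ []
instance (plaintext : String) (key : String) : Decidable (Pre_des_encrypt_text plaintext key) := by
  unfold Pre_des_encrypt_text; infer_instance
def pvWitness_des_encrypt_text : String × String := ("a", "k")


def Spec_des_encrypt_text (plaintext : String) (key : String) (out : String) : Prop := out = des_encrypt_text_alt plaintext key
instance (plaintext : String) (key : String) (out : String) : Decidable (Spec_des_encrypt_text plaintext key out) := by unfold Spec_des_encrypt_text; infer_instance

-- ===== CLAIM (what is proved, stated in full; the proofs are below) =====
def Claim_equal_des_encrypt_text : Prop := ∀ (plaintext : String) (key : String), Dom_des_encrypt_text plaintext key → Pre_des_encrypt_text plaintext key → Spec_des_encrypt_text plaintext key (des_encrypt_text plaintext key)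

-- ===== LEMMAS AND PROOFS =====

/-! ### Digit-value core: `pvDv B l` is the value of the base-`B` digit string `l` (MSB first). -/

def pvBit (c : Char) : Nat := if c = '1' then 1 else 0

def pvDv (B : Nat) (l : List Nat) : Nat := l.foldl (fun a x => a * B + x) 0

def pvIsBits (s : List Char) : Prop := ∀ c ∈ s, c = '0' ∨ c = '1'

theorem pvDv_init_id (B : Nat) (l : List Nat) (init : Nat) :
    l.foldl (fun a x => a * B + x) init = init * B ^ l.length + pvDv B l := by
  induction l generalizing init with
  | nil => simp [pvDv]
  | cons y t ih =>
    have hdv : pvDv B (y :: t) = (0 * B + y) * B ^ t.length + pvDv B t := by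
      rw [pvDv, List.foldl_cons, ih]
    simp only [List.foldl_cons, List.length_cons]
    rw [ih (init * B + y), hdv, Nat.pow_succ]
    ring

theorem pvDv_init (B : Nat) {α : Type} (f : α → Nat) (l : List α) (init : Nat) :
    l.foldl (fun a x => a * B + f x) init = init * B ^ l.length + pvDv B (l.map f) := by
  have h := pvDv_init_id B (l.map f) init
  rw [List.foldl_map] at h
  simpa using h

theorem pvDv_cons (B : Nat) (x : Nat) (l : List Nat) :
    pvDv B (x :: l) = x * B ^ l.length + pvDv B l := by
  rw [pvDv, List.foldl_cons, pvDv_init_id]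
  ring_nf

theorem pvDv_append (B : Nat) (u v : List Nat) :
    pvDv B (u ++ v) = pvDv B u * B ^ v.length + pvDv B v := by
  induction u with
  | nil => simp [pvDv]
  | cons x t ih =>
    rw [List.cons_append, pvDv_cons, pvDv_cons, ih]
    simp [List.length_append, Nat.pow_add]; ring

theorem pvDv_lt (B : Nat) (_hB : 0 < B) (l : List Nat) (h : ∀ x ∈ l, x < B) :
    pvDv B l < B ^ l.length := by
  induction l with
  | nil => simp [pvDv]
  | cons x t ih =>
    rw [pvDv_cons]
    have hx : x < B := h x (by simp)
    have ht := ih (fun y hy => h y (by simp [hy]))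
    have : (x + 1) * B ^ t.length ≤ B ^ (t.length + 1) := by
      rw [Nat.pow_succ, Nat.mul_comm (B ^ t.length) B]
      exact Nat.mul_le_mul_right _ (by omega)
    simp only [List.length_cons]
    calc x * B ^ t.length + pvDv B t < x * B ^ t.length + B ^ t.length := by omega
    _ = (x + 1) * B ^ t.length := by ring
    _ ≤ B ^ (t.length + 1) := this

theorem pvBitsToNat_eq_dv (s : List Char) : pvBitsToNat s = pvDv 2 (s.map pvBit) := by
  rw [pvDv, List.foldl_map]
  show s.foldl (fun a c => 2 * a + (if c = '1' then 1 else 0)) 0 = _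
  have : (fun (a : Nat) (c : Char) => 2 * a + (if c = '1' then 1 else 0)) =
      (fun a c => a * 2 + pvBit c) := by
    funext a c; simp [pvBit]; ring_nf
  rw [this]

theorem pvBits_map_le (s : List Char) (h : pvIsBits s) : ∀ x ∈ s.map pvBit, x < 2 := by
  intro x hx
  rcases List.mem_map.1 hx with ⟨c, hc, rfl⟩
  rcases h c hc with h0 | h0 <;> simp [h0, pvBit]

/-! ### Extraction: shifting / masking a digit value picks out sub-segments. -/

theorem pvDv_shiftr (l : List Nat) (h : ∀ x ∈ l, x < 2) (k : Nat) (hk : k ≤ l.length) :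
    pvDv 2 l >>> k = pvDv 2 (l.take (l.length - k)) := by
  rw [Nat.shiftRight_eq_div_pow]
  conv_lhs => rw [show l = l.take (l.length - k) ++ l.drop (l.length - k) from (List.take_append_drop _ l).symm]
  rw [pvDv_append]
  have hlen : (l.drop (l.length - k)).length = k := by simp; omega
  rw [hlen]
  have hlt : pvDv 2 (l.drop (l.length - k)) < 2 ^ k := by
    have := pvDv_lt 2 (by omega) (l.drop (l.length - k)) (fun x hx => h x (List.mem_of_mem_drop hx))
    rwa [hlen] at this
  rw [Nat.add_comm, Nat.add_mul_div_right _ _ (Nat.two_pow_pos k), Nat.div_eq_of_lt hlt]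
  omega

theorem pvDv_mod (l : List Nat) (h : ∀ x ∈ l, x < 2) (k : Nat) (hk : k ≤ l.length) :
    pvDv 2 l % 2 ^ k = pvDv 2 (l.drop (l.length - k)) := by
  conv_lhs => rw [show l = l.take (l.length - k) ++ l.drop (l.length - k) from (List.take_append_drop _ l).symm]
  rw [pvDv_append]
  have hlen : (l.drop (l.length - k)).length = k := by simp; omega
  have hlt : pvDv 2 (l.drop (l.length - k)) < 2 ^ k := by
    have := pvDv_lt 2 (by omega) (l.drop (l.length - k)) (fun x hx => h x (List.mem_of_mem_drop hx))
    rwa [hlen] at this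
  rw [hlen, Nat.add_comm, Nat.add_mul_mod_self_right, Nat.mod_eq_of_lt hlt]

theorem pvDv_group (l : List Nat) (h : ∀ x ∈ l, x < 2) (a m : Nat) (ham : a + m ≤ l.length) :
    (pvDv 2 l >>> (l.length - a - m)) &&& (2 ^ m - 1) = pvDv 2 ((l.drop a).take m) := by
  rw [Nat.and_two_pow_sub_one_eq_mod]
  rw [pvDv_shiftr l h (l.length - a - m) (by omega)]
  have h1 : l.length - (l.length - a - m) = a + m := by omega
  rw [h1]
  have h2 : ∀ x ∈ l.take (a + m), x < 2 := fun x hx => h x (List.mem_of_mem_take hx)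
  rw [pvDv_mod _ h2 m (by simp; omega)]
  have h3 : (l.take (a + m)).length - m = a := by simp; omega
  rw [h3, List.drop_take, show a + m - a = m by omega]

theorem pvDv_bit (l : List Nat) (h : ∀ x ∈ l, x < 2) (k : Nat) (hk : k < l.length) :
    (pvDv 2 l >>> (l.length - 1 - k)) &&& 1 = l.getD k 0 := by
  have := pvDv_group l h k 1 (by omega)
  rw [show l.length - k - 1 = l.length - 1 - k by omega] at this
  rw [show (2 : Nat) ^ 1 - 1 = 1 by norm_num] at this
  rw [this]
  have h1 : k < l.length := hk
  have : (l.drop k).take 1 = [l.getD k 0] := by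
    rw [List.getD_eq_getElem l 0 h1, List.drop_eq_getElem_cons h1]
    rfl
  rw [this, pvDv_cons]
  simp [pvDv]

/-! ### Facts about the 8-bit / 4-bit formatters, by finite check -/

def pvZok (w m : Nat) : Bool :=
  let z := PySem.Chars.zfill (PySem.Int.toBinChars (m : Int)) w
  (z.length == w) && z.all (fun c => c == '0' || c == '1') && (pvBitsToNat z == m)

set_option maxRecDepth 4096 in
theorem pvZ8_all : (List.range 128).all (pvZok 8) = true := by decide

theorem pvZ4_all : (List.range 16).all (pvZok 4) = true := by decide

theorem pvZok_spec (w m : Nat) (h : pvZok w m = true) :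
    ((PySem.Chars.zfill (PySem.Int.toBinChars (m : Int)) w).length = w ∧
     pvIsBits (PySem.Chars.zfill (PySem.Int.toBinChars (m : Int)) w) ∧
     pvBitsToNat (PySem.Chars.zfill (PySem.Int.toBinChars (m : Int)) w) = m) := by
  unfold pvZok at h
  simp only [Bool.and_eq_true, beq_iff_eq, List.all_eq_true, Bool.or_eq_true] at h
  obtain ⟨⟨h1, h2⟩, h3⟩ := h
  have hw : ((w : Int)).toNat = w := by simp
  refine ⟨?_, ?_, ?_⟩
  · exact_mod_cast h1
  · intro c hc
    have := h2 c hc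
    simpa using this
  · exact h3

theorem pvZ8_facts (m : Nat) (hm : m < 128) :
    ((PySem.Chars.zfill (PySem.Int.toBinChars (m : Int)) 8).length = 8 ∧
     pvIsBits (PySem.Chars.zfill (PySem.Int.toBinChars (m : Int)) 8) ∧
     pvBitsToNat (PySem.Chars.zfill (PySem.Int.toBinChars (m : Int)) 8) = m) := by
  refine pvZok_spec 8 m ?_
  have := pvZ8_all
  rw [List.all_eq_true] at this
  exact this m (List.mem_range.2 hm)

theorem pvZ4_facts (m : Nat) (hm : m < 16) :
    ((PySem.Chars.zfill (PySem.Int.toBinChars (m : Int)) 4).length = 4 ∧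
     pvIsBits (PySem.Chars.zfill (PySem.Int.toBinChars (m : Int)) 4) ∧
     pvBitsToNat (PySem.Chars.zfill (PySem.Int.toBinChars (m : Int)) 4) = m) := by
  refine pvZok_spec 4 m ?_
  have := pvZ4_all
  rw [List.all_eq_true] at this
  exact this m (List.mem_range.2 hm)

theorem pvBitsToNat_append (u v : List Char) :
    pvBitsToNat (u ++ v) = pvBitsToNat u * 2 ^ v.length + pvBitsToNat v := by
  simp only [pvBitsToNat_eq_dv, List.map_append, pvDv_append, List.length_map]

theorem pvBitsToNat_lt (s : List Char) (h : pvIsBits s) : pvBitsToNat s < 2 ^ s.length := by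
  rw [pvBitsToNat_eq_dv]
  have := pvDv_lt 2 (by omega) (s.map pvBit) (pvBits_map_le s h)
  simpa using this

/-! ### Permutation tables: string picks vs integer bit extraction -/

theorem pvPermuteA_length (bs : List Char) (table : List Nat) :
    (pvPermuteA bs table).length = table.length := by simp [pvPermuteA]

theorem pvPermuteA_bits (bs : List Char) (hbs : pvIsBits bs) (table : List Nat) :
    pvIsBits (pvPermuteA bs table) := by
  intro c hc
  rcases List.mem_map.1 hc with ⟨i, _, rfl⟩
  by_cases h : i - 1 < bs.length
  · rw [List.getD_eq_getElem bs '0' h]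
    exact hbs _ (List.getElem_mem h)
  · rw [List.getD_eq_default bs '0' (by omega)]
    left; rfl

theorem pvGetD_map_pvBit (bs : List Char) (k : Nat) :
    (bs.map pvBit).getD k 0 = pvBit (bs.getD k '0') := by
  by_cases h : k < bs.length
  · rw [List.getD_eq_getElem _ 0 (by simpa using h), List.getD_eq_getElem _ '0' h]
    simp
  · rw [List.getD_eq_default _ 0 (by simpa using h), List.getD_eq_default _ '0' (by omega)]
    simp [pvBit]

theorem pvPermuteB_eq (bs : List Char) (hbs : pvIsBits bs) (table : List Nat)
    (htab : ∀ p ∈ table, 1 ≤ p ∧ p ≤ bs.length) :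
    pvPermuteB (pvBitsToNat bs) bs.length table = pvBitsToNat (pvPermuteA bs table) := by
  rw [pvPermuteB, pvDv_init 2 (fun p => (pvBitsToNat bs >>> (bs.length - p)) &&& 1) table 0]
  simp only [Nat.zero_mul, Nat.zero_add]
  rw [pvBitsToNat_eq_dv (pvPermuteA bs table)]
  congr 1
  rw [pvPermuteA, List.map_map]
  apply List.map_congr_left
  intro p hp
  obtain ⟨h1p, hpw⟩ := htab p hp
  rw [pvBitsToNat_eq_dv]
  have hbit := pvDv_bit (bs.map pvBit) (pvBits_map_le bs hbs) (p - 1) (by simp; omega)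
  simp only [List.length_map] at hbit
  rw [show bs.length - 1 - (p - 1) = bs.length - p by omega] at hbit
  simp only [Function.comp_apply]
  rw [hbit, pvGetD_map_pvBit]

/-! ### The S-box pass -/

theorem pvSBOXbox_lt : ∀ r : Nat, r < 4 → ∀ c : Nat, c < 16 →
    ((pvSBOXbox.getD r []).getD c 0) < 16 := by decide

def pvStepA (bs : List Char) (output : List Char) (i : Nat) : List Char :=
  let block := PySem.List.slice bs (some ((i * 6 : Nat) : Int)) (some (((i + 1) * 6 : Nat) : Int))
  let row := pvBitsToNat [block.getD 0 '0', block.getD 5 '0']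
  let col := pvBitsToNat (PySem.List.slice block (some 1) (some 5))
  let val := ((pvSBOX.getD i []).getD row []).getD col 0
  output ++ PySem.Chars.zfill (PySem.Int.toBinChars (val : Int)) 4

def pvStepB (v48 : Nat) (out : Nat) (i : Nat) : Nat :=
  let g := (v48 >>> (42 - 6 * i)) &&& 0x3F
  let row := ((g >>> 5) &&& 1) * 2 + (g &&& 1)
  let col := (g >>> 1) &&& 0xF
  out * 16 + (pvSBOXbox.getD row []).getD col 0

theorem pvSboxA_eq_fold (bs : List Char) : pvSboxA bs = (List.range 8).foldl (pvStepA bs) [] := rfl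

theorem pvSboxB_eq_fold (v : Nat) : pvSboxB v = (List.range 8).foldl (pvStepB v) 0 := rfl

theorem pvStep_correct (bs : List Char) (hlen : bs.length = 48) (hbs : pvIsBits bs)
    (i : Nat) (hi : i < 8) (accA : List Char) (accB : Nat) (hacc : accB = pvBitsToNat accA)
    (haccb : pvIsBits accA) :
    pvStepB (pvBitsToNat bs) accB i = pvBitsToNat (pvStepA bs accA i) ∧
    (pvStepA bs accA i).length = accA.length + 4 ∧ pvIsBits (pvStepA bs accA i) := by
  have hslice : PySem.List.slice bs (some ((i * 6 : Nat) : Int)) (some (((i + 1) * 6 : Nat) : Int))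
      = (bs.drop (i * 6)).take 6 := by
    rw [PySem.List.slice_natCast]
    congr 1
    omega
  set block := (bs.drop (i * 6)).take 6 with hblock
  have hblen : block.length = 6 := by simp [hblock]; omega
  have hbbits : pvIsBits block := fun c hc => hbs c (List.mem_of_mem_drop (List.mem_of_mem_take hc))
  -- the 6-bit group value
  have hg : (pvBitsToNat bs >>> (42 - 6 * i)) &&& 0x3F = pvBitsToNat block := by
    have := pvDv_group (bs.map pvBit) (pvBits_map_le bs hbs) (i * 6) 6 (by simp; omega)
    simp only [List.length_map] at this
    rw [show bs.length - i * 6 - 6 = 42 - 6 * i by omega] at this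
    rw [pvBitsToNat_eq_dv bs, pvBitsToNat_eq_dv block]
    rw [show (0x3F : Nat) = 2 ^ 6 - 1 by norm_num, this, hblock]
    rw [List.map_take, List.map_drop]
  have hblt : pvBitsToNat block < 2 ^ 6 := by
    have := pvBitsToNat_lt block hbbits
    rwa [hblen] at this
  -- row
  have hrow : ((pvBitsToNat block >>> 5) &&& 1) * 2 + (pvBitsToNat block &&& 1)
      = pvBitsToNat [block.getD 0 '0', block.getD 5 '0'] := by
    have h0 := pvDv_bit (block.map pvBit) (pvBits_map_le block hbbits) 0 (by simp [hblen])
    have h5 := pvDv_bit (block.map pvBit) (pvBits_map_le block hbbits) 5 (by simp [hblen])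
    simp only [List.length_map, hblen] at h0 h5
    rw [show (6:Nat) - 1 - 0 = 5 by omega] at h0
    rw [show (6:Nat) - 1 - 5 = 0 by omega, Nat.shiftRight_zero] at h5
    simp only [pvBitsToNat_eq_dv]
    rw [h0, h5, pvGetD_map_pvBit, pvGetD_map_pvBit]
    simp [pvDv, List.map_cons]
  -- col
  have hcol : (pvBitsToNat block >>> 1) &&& 0xF
      = pvBitsToNat (PySem.List.slice block (some 1) (some 5)) := by
    have := pvDv_group (block.map pvBit) (pvBits_map_le block hbbits) 1 4 (by simp [hblen])
    simp only [List.length_map, hblen] at this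
    rw [show (6:Nat) - 1 - 4 = 1 by omega] at this
    rw [show PySem.List.slice block (some 1) (some 5) = (block.drop 1).take 4 by
      rw [show (1:Int) = ((1:Nat):Int) by norm_num, show (5:Int) = ((5:Nat):Int) by norm_num,
        PySem.List.slice_natCast]]
    rw [pvBitsToNat_eq_dv, pvBitsToNat_eq_dv]
    rw [show (0xF : Nat) = 2 ^ 4 - 1 by norm_num, this]
    simp [hblock, List.map_take, List.map_drop]
  -- bounds for row/col
  have hrowlt : pvBitsToNat [block.getD 0 '0', block.getD 5 '0'] < 4 := by
    have b0 : pvBit (block.getD 0 '0') ≤ 1 := by unfold pvBit; split <;> omega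
    have b5 : pvBit (block.getD 5 '0') ≤ 1 := by unfold pvBit; split <;> omega
    simp only [pvBitsToNat, List.foldl_cons, List.foldl_nil]
    unfold pvBit at b0 b5
    split at b0 <;> split at b5 <;> simp_all
  have hcollt : pvBitsToNat (PySem.List.slice block (some 1) (some 5)) < 16 := by
    rw [show PySem.List.slice block (some 1) (some 5) = (block.drop 1).take 4 by
      rw [show (1:Int) = ((1:Nat):Int) by norm_num, show (5:Int) = ((5:Nat):Int) by norm_num,
        PySem.List.slice_natCast]]
    have hb' : pvIsBits ((block.drop 1).take 4) := fun c hc =>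
      hbbits c (List.mem_of_mem_drop (List.mem_of_mem_take hc))
    have := pvBitsToNat_lt _ hb'
    have hl : ((block.drop 1).take 4).length = 4 := by simp [hblen]
    rw [hl] at this
    exact this
  -- value
  have hSB : pvSBOX.getD i [] = pvSBOXbox := by
    rw [pvSBOX, List.getD_eq_getElem _ [] (by simpa using hi), List.getElem_replicate]
  have hval : (pvSBOXbox.getD (pvBitsToNat [block.getD 0 '0', block.getD 5 '0']) []).getD
      (pvBitsToNat (PySem.List.slice block (some 1) (some 5))) 0 < 16 :=
    pvSBOXbox_lt _ (by omega) _ hcollt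
  obtain ⟨hz4len, hz4bits, hz4val⟩ := pvZ4_facts _ hval
  refine ⟨?_, ?_, ?_⟩
  · show pvStepB (pvBitsToNat bs) accB i = pvBitsToNat (pvStepA bs accA i)
    rw [pvStepB, pvStepA]
    simp only [hslice, hg, hrow, hcol, hSB]
    rw [pvBitsToNat_append, hz4len, hz4val, hacc]
    norm_num
  · rw [pvStepA]
    simp only [hslice, hSB]
    rw [List.length_append, hz4len]
  · rw [pvStepA]
    simp only [hslice, hSB]
    intro c hc
    rcases List.mem_append.1 hc with h | h
    · exact haccb c h
    · exact hz4bits c h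

theorem pvSboxA_facts (bs : List Char) (hlen : bs.length = 48) (hbs : pvIsBits bs) :
    pvSboxB (pvBitsToNat bs) = pvBitsToNat (pvSboxA bs) ∧
    (pvSboxA bs).length = 32 ∧ pvIsBits (pvSboxA bs) := by
  rw [pvSboxA_eq_fold, pvSboxB_eq_fold]
  have main : ∀ n, n ≤ 8 →
      ((List.range n).foldl (pvStepB (pvBitsToNat bs)) 0
        = pvBitsToNat ((List.range n).foldl (pvStepA bs) []) ∧
       ((List.range n).foldl (pvStepA bs) []).length = 4 * n ∧
       pvIsBits ((List.range n).foldl (pvStepA bs) [])) := by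
    intro n hn
    induction n with
    | zero => refine ⟨by simp [pvBitsToNat], by simp, by intro c hc; simp at hc⟩
    | succ m ih =>
      obtain ⟨h1, h2, h3⟩ := ih (by omega)
      rw [List.range_succ, List.foldl_append, List.foldl_append]
      simp only [List.foldl_cons, List.foldl_nil]
      obtain ⟨s1, s2, s3⟩ := pvStep_correct bs hlen hbs m (by omega) _ _ h1 h3
      exact ⟨s1, by rw [s2, h2]; ring, s3⟩
  have := main 8 (by omega)
  exact ⟨this.1, by rw [this.2.1], this.2.2⟩

/-! ### XOR glue -/

theorem pvXor_glue (n x y u v : Nat) (hu : u < 2 ^ n) (hv : v < 2 ^ n) :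
    (x * 2 ^ n + u) ^^^ (y * 2 ^ n + v) = (x ^^^ y) * 2 ^ n + (u ^^^ v) := by
  apply Nat.eq_of_testBit_eq
  intro j
  have huv : u ^^^ v < 2 ^ n := Nat.xor_lt_two_pow hu hv
  rw [Nat.mul_comm x, Nat.mul_comm y, Nat.mul_comm (x ^^^ y)]
  rw [Nat.testBit_xor, Nat.testBit_two_pow_mul_add x hu, Nat.testBit_two_pow_mul_add y hv,
      Nat.testBit_two_pow_mul_add (x ^^^ y) huv]
  by_cases hj : j < n <;> simp [hj, Nat.testBit_xor]

theorem pvXorA_length (a b : List Char) : (pvXorA a b).length = min a.length b.length := by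
  simp [pvXorA]

theorem pvXorA_eq (a b : List Char) (hlen : a.length = b.length)
    (ha : pvIsBits a) (hb : pvIsBits b) :
    pvBitsToNat (pvXorA a b) = pvBitsToNat a ^^^ pvBitsToNat b := by
  induction a generalizing b with
  | nil => cases b <;> simp_all [pvXorA, pvBitsToNat]
  | cons x t ih =>
    cases b with
    | nil => simp at hlen
    | cons y s =>
      have hlen' : t.length = s.length := by simpa using hlen
      have ht : pvIsBits t := fun c hc => ha c (by simp [hc])
      have hs : pvIsBits s := fun c hc => hb c (by simp [hc])
      have hx := ha x (by simp)
      have hy := hb y (by simp)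
      have hxorcons : pvXorA (x :: t) (y :: s) =
          (if x ≠ y then '1' else '0') :: pvXorA t s := by simp [pvXorA]
      rw [hxorcons, pvBitsToNat_eq_dv, pvBitsToNat_eq_dv, pvBitsToNat_eq_dv]
      simp only [List.map_cons, pvDv_cons, List.length_map, pvXorA_length, hlen', min_self]
      have ih' := ih s hlen' ht hs
      simp only [pvBitsToNat_eq_dv] at ih'
      rw [ih']
      have hu : pvDv 2 (t.map pvBit) < 2 ^ s.length := by
        have := pvDv_lt 2 (by omega) (t.map pvBit) (pvBits_map_le t ht)
        simpa [hlen'] using this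
      have hv : pvDv 2 (s.map pvBit) < 2 ^ s.length := by
        have := pvDv_lt 2 (by omega) (s.map pvBit) (pvBits_map_le s hs)
        simpa using this
      rw [pvXor_glue _ _ _ _ _ hu hv]
      congr 1
      rcases hx with rfl | rfl <;> rcases hy with rfl | rfl <;> simp [pvBit]

/-! ### Feistel function and the sixteen rounds -/

theorem pvE_bounds : ∀ p ∈ pvE, 1 ≤ p ∧ p ≤ 32 := by decide
theorem pvIP_bounds : ∀ p ∈ pvIP, 1 ≤ p ∧ p ≤ 64 := by decide
theorem pvFP_bounds : ∀ p ∈ pvFP, 1 ≤ p ∧ p ≤ 64 := by decide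
theorem pvE_len : pvE.length = 48 := rfl
theorem pvIP_len : pvIP.length = 64 := rfl
theorem pvFP_len : pvFP.length = 64 := rfl

theorem pvXorA_bits (a b : List Char) : pvIsBits (pvXorA a b) := by
  intro c hc
  rcases List.mem_map.1 hc with ⟨p, _, rfl⟩
  by_cases h : p.1 ≠ p.2 <;> simp [h]

theorem pvFeistel_facts (R k : List Char) (hR : R.length = 32) (hRb : pvIsBits R)
    (hk : k.length = 48) (hkb : pvIsBits k) :
    pvFeistelB (pvBitsToNat R) (pvBitsToNat k) = pvBitsToNat (pvFeistelA R k) ∧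
    (pvFeistelA R k).length = 32 ∧ pvIsBits (pvFeistelA R k) := by
  have hEb : ∀ p ∈ pvE, 1 ≤ p ∧ p ≤ R.length := by rw [hR]; exact pvE_bounds
  have hperm := pvPermuteB_eq R hRb pvE hEb
  have hplen : (pvPermuteA R pvE).length = 48 := by rw [pvPermuteA_length, pvE_len]
  have hpbits := pvPermuteA_bits R hRb pvE
  have hxlen : (pvXorA (pvPermuteA R pvE) k).length = 48 := by
    rw [pvXorA_length, hplen, hk]; simp
  have hxbits := pvXorA_bits (pvPermuteA R pvE) k
  have hxval := pvXorA_eq (pvPermuteA R pvE) k (by rw [hplen, hk]) hpbits hkb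
  obtain ⟨sb1, sb2, sb3⟩ := pvSboxA_facts _ hxlen hxbits
  refine ⟨?_, ?_, ?_⟩
  · rw [pvFeistelB, pvFeistelA, ← hR, hperm, ← hxval, sb1]
  · rw [pvFeistelA]; exact sb2
  · rw [pvFeistelA]; exact sb3

theorem pvRange_foldl_getD {α β : Type} (l : List α) (d : α) (F : β → α → β) :
    ∀ init, (List.range l.length).foldl (fun s i => F s (l.getD i d)) init = l.foldl F init := by
  induction l with
  | nil => intro init; simp
  | cons x t ih =>
    intro init
    rw [List.length_cons, List.range_succ_eq_map, List.foldl_cons, List.foldl_map]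
    simp only [List.getD_cons_zero, List.getD_cons_succ]
    exact ih (F init x)

theorem pvRounds (sks : List (List Char)) (h : ∀ s ∈ sks, s.length = 48 ∧ pvIsBits s) :
    ∀ L R : List Char, L.length = 32 → R.length = 32 → pvIsBits L → pvIsBits R →
    ((sks.map pvBitsToNat).foldl (fun LR k => (LR.2, LR.1 ^^^ pvFeistelB LR.2 k))
        (pvBitsToNat L, pvBitsToNat R)
      = (pvBitsToNat (sks.foldl (fun LR s => (LR.2, pvXorA LR.1 (pvFeistelA LR.2 s))) (L, R)).1,
         pvBitsToNat (sks.foldl (fun LR s => (LR.2, pvXorA LR.1 (pvFeistelA LR.2 s))) (L, R)).2) ∧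
     (sks.foldl (fun LR s => (LR.2, pvXorA LR.1 (pvFeistelA LR.2 s))) (L, R)).1.length = 32 ∧
     (sks.foldl (fun LR s => (LR.2, pvXorA LR.1 (pvFeistelA LR.2 s))) (L, R)).2.length = 32 ∧
     pvIsBits (sks.foldl (fun LR s => (LR.2, pvXorA LR.1 (pvFeistelA LR.2 s))) (L, R)).1 ∧
     pvIsBits (sks.foldl (fun LR s => (LR.2, pvXorA LR.1 (pvFeistelA LR.2 s))) (L, R)).2) := by
  induction sks with
  | nil =>
    intro L R h1 h2 h3 h4
    exact ⟨rfl, h1, h2, h3, h4⟩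
  | cons s t ih =>
    intro L R h1 h2 h3 h4
    obtain ⟨hs1, hs2⟩ := h s (by simp)
    obtain ⟨f1, f2, f3⟩ := pvFeistel_facts R s h2 h4 hs1 hs2
    have hxlen : (pvXorA L (pvFeistelA R s)).length = 32 := by
      rw [pvXorA_length, h1, f2]; simp
    have hxbits := pvXorA_bits L (pvFeistelA R s)
    have hxval : pvBitsToNat L ^^^ pvFeistelB (pvBitsToNat R) (pvBitsToNat s)
        = pvBitsToNat (pvXorA L (pvFeistelA R s)) := by
      rw [f1, pvXorA_eq L (pvFeistelA R s) (by rw [h1, f2]) h3 f3]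
    simp only [List.map_cons, List.foldl_cons]
    rw [hxval]
    exact ih (fun u hu => h u (by simp [hu])) R (pvXorA L (pvFeistelA R s)) h2 hxlen h4 hxbits

/-! ### Subkey generation: the cycled key stream -/

theorem pvGetD_bit_char (kb : List Char) (hkb : pvIsBits kb) (i : Nat) :
    kb.getD i '0' = '0' ∨ kb.getD i '0' = '1' := by
  by_cases h : i < kb.length
  · rw [List.getD_eq_getElem kb '0' h]
    exact hkb _ (List.getElem_mem h)
  · rw [List.getD_eq_default kb '0' (by omega)]
    left; rfl

theorem pvDraw_spec (kb : List Char) (hkb : kb ≠ []) :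
    ∀ n pos, pos < kb.length →
    ((pvDraw kb pos n).1 = (List.range n).map (fun t => kb.getD ((pos + t) % kb.length) '0') ∧
     (pvDraw kb pos n).2 = (pos + n) % kb.length) := by
  have hK : 0 < kb.length := List.length_pos_of_ne_nil hkb
  intro n
  induction n with
  | zero =>
    intro pos hpos
    simp [pvDraw, Nat.mod_eq_of_lt hpos]
  | succ m ih =>
    intro pos hpos
    obtain ⟨ih1, ih2⟩ := ih ((pos + 1) % kb.length) (Nat.mod_lt _ hK)
    rw [pvDraw]
    refine ⟨?_, ?_⟩
    · simp only [ih1, List.range_succ_eq_map, List.map_cons, List.map_map]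
      congr 1
      · rw [Nat.add_zero, Nat.mod_eq_of_lt hpos]
      · apply List.map_congr_left
        intro t _
        simp only [Function.comp_apply]
        rw [Nat.mod_add_mod]
        congr 2
        omega
    · rw [ih2, Nat.mod_add_mod]
      congr 1
      omega

theorem pvGenSubkeysA_spec (kb : List Char) (hkb : kb ≠ []) :
    pvGenSubkeysA kb = (List.range 16).map (fun j =>
      (List.range 48).map (fun t => kb.getD ((48 * j + t) % kb.length) '0')) := by
  have hK : 0 < kb.length := List.length_pos_of_ne_nil hkb
  have main : ∀ n, ((List.range n).foldl (fun st (_ : Nat) =>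
      let d := pvDraw kb st.2 48
      (st.1 ++ [d.1], d.2)) (([], 0) : List (List Char) × Nat))
      = ((List.range n).map (fun j =>
          (List.range 48).map (fun t => kb.getD ((48 * j + t) % kb.length) '0')),
         (48 * n) % kb.length) := by
    intro n
    induction n with
    | zero => simp [Nat.mod_eq_of_lt hK]
    | succ m ihm =>
      rw [show List.range (m + 1) = List.range m ++ [m] from List.range_succ]
      rw [List.foldl_append, List.foldl_cons, List.foldl_nil, ihm]
      obtain ⟨d1, d2⟩ := pvDraw_spec kb hkb 48 ((48 * m) % kb.length) (Nat.mod_lt _ hK)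
      simp only [d1, d2]
      rw [List.map_append, List.map_singleton]
      congr 1
      · congr 1
        congr 1
        apply List.map_congr_left
        intro t _
        rw [Nat.mod_add_mod]
      · rw [Nat.mod_add_mod]
        congr 1
  rw [pvGenSubkeysA, main 16]

theorem pvSubkeysA_facts (kb : List Char) (hkb : kb ≠ []) (hbits : pvIsBits kb) :
    (pvGenSubkeysA kb).length = 16 ∧
    ∀ s ∈ pvGenSubkeysA kb, s.length = 48 ∧ pvIsBits s := by
  rw [pvGenSubkeysA_spec kb hkb]
  refine ⟨by simp, ?_⟩
  intro s hs
  rcases List.mem_map.1 hs with ⟨j, _, rfl⟩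
  refine ⟨by simp, ?_⟩
  intro c hc
  rcases List.mem_map.1 hc with ⟨t, _, rfl⟩
  exact pvGetD_bit_char kb hbits _


/-! ### Bytes ↔ bit-strings, padding, and the key bit list -/

def pvBOB (l : List Nat) : List Char :=
  l.flatMap (fun (m : Nat) => PySem.Chars.zfill (PySem.Int.toBinChars (m : Int)) 8)

theorem pvBOB_append (u v : List Nat) : pvBOB (u ++ v) = pvBOB u ++ pvBOB v := by
  simp [pvBOB]

theorem pvBOB_length (l : List Nat) (h : ∀ x ∈ l, x < 128) : (pvBOB l).length = 8 * l.length := by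
  induction l with
  | nil => simp [pvBOB]
  | cons y t ih =>
    have hy := (pvZ8_facts y (h y (by simp))).1
    rw [show pvBOB (y :: t) = PySem.Chars.zfill (PySem.Int.toBinChars (y : Int)) 8 ++ pvBOB t from rfl]
    rw [List.length_append, hy, ih (fun x hx => h x (by simp [hx]))]
    simp [List.length_cons]; ring

theorem pvBOB_bits (l : List Nat) (h : ∀ x ∈ l, x < 128) : pvIsBits (pvBOB l) := by
  intro c hc
  rcases List.mem_flatMap.1 hc with ⟨m, hm, hcm⟩
  exact (pvZ8_facts m (h m hm)).2.1 c hcm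

theorem pvBOB_value (l : List Nat) (h : ∀ x ∈ l, x < 128) :
    pvBitsToNat (pvBOB l) = pvDv 256 l := by
  induction l with
  | nil => simp [pvBOB, pvBitsToNat, pvDv]
  | cons y t ih =>
    obtain ⟨hy1, _, hy3⟩ := pvZ8_facts y (h y (by simp))
    rw [show pvBOB (y :: t) = PySem.Chars.zfill (PySem.Int.toBinChars (y : Int)) 8 ++ pvBOB t from rfl]
    rw [pvBitsToNat_append, hy3, ih (fun x hx => h x (by simp [hx])), pvDv_cons,
      pvBOB_length t (fun x hx => h x (by simp [hx]))]
    congr 2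
    rw [show (256 : Nat) = 2 ^ 8 by norm_num, ← Nat.pow_mul]

theorem pvTextToBits_eq (t : List Char) : pvTextToBits t = pvBOB (t.map (fun c => c.toNat)) := by
  rw [pvTextToBits, pvBOB, List.flatMap_map]

theorem pvPad64_eq (bs : List Char) :
    pvPad64 bs = bs ++ List.replicate ((64 - bs.length % 64) % 64) '0' := by
  fun_induction pvPad64 bs with
  | case1 bs h ih =>
    rw [ih, List.append_assoc]
    congr 1
    rw [show ['0'] ++ List.replicate ((64 - (bs ++ ['0']).length % 64) % 64) '0'
        = List.replicate ((64 - (bs ++ ['0']).length % 64) % 64 + 1) '0' by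
      rw [List.replicate_succ]; rfl]
    congr 1
    simp only [List.length_append, List.length_cons, List.length_nil]
    omega
  | case2 bs h =>
    simp only [ne_eq, Decidable.not_not] at h
    rw [h]
    simp

theorem pvKeyBits_eq (key : List Char) (hdom : ∀ c ∈ key, c.toNat < 128) :
    key.flatMap (fun c => (List.range 8).map (fun t => (c.toNat >>> (7 - t)) &&& 1))
      = (pvTextToBits key).map pvBit := by
  rw [pvTextToBits, List.map_flatMap]
  apply List.flatMap_congr
  intro c hc
  obtain ⟨h1, h2, h3⟩ := pvZ8_facts c.toNat (hdom c hc)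
  apply List.ext_getElem
  · simp [h1]
  · intro i hi hi'
    simp only [List.getElem_map, List.getElem_range]
    have hbit := pvDv_bit ((PySem.Chars.zfill (PySem.Int.toBinChars ((c.toNat : Nat) : Int)) 8).map pvBit)
      (pvBits_map_le _ h2) i (by simp [h1]; simpa [h1] using hi)
    simp only [List.length_map, h1] at hbit
    rw [show (8 : Nat) - 1 - i = 7 - i by omega] at hbit
    rw [← pvBitsToNat_eq_dv, h3] at hbit
    rw [hbit, pvGetD_map_pvBit, List.getD_eq_getElem _ '0' (by simp [h1]; simpa [h1] using hi)]


/-! ### B's subkey integers are the values of A's subkey strings -/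

theorem pvSubkeysB_eq (kbA : List Char) (hkbA : kbA ≠ []) (hbits : pvIsBits kbA) :
    (List.range 16).foldl (fun sks j =>
      sks ++ [(List.range 48).foldl (fun k t =>
        k * 2 + (kbA.map pvBit).getD ((48 * j + t) % (kbA.map pvBit).length) 0) 0]) []
    = (pvGenSubkeysA kbA).map pvBitsToNat := by
  rw [PySem.List.foldl_append_singleton_eq_map, pvGenSubkeysA_spec kbA hkbA, List.map_map]
  simp only [List.nil_append]
  apply List.map_congr_left
  intro j _
  rw [pvDv_init 2 (fun t =>
    (kbA.map pvBit).getD ((48 * j + t) % (kbA.map pvBit).length) 0) (List.range 48) 0]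
  simp only [Nat.zero_mul, Nat.zero_add, Function.comp_apply]
  rw [pvBitsToNat_eq_dv, List.map_map]
  congr 1
  apply List.map_congr_left
  intro t _
  simp only [Function.comp_apply, List.length_map]
  exact pvGetD_map_pvBit kbA _

/-! ### Hex digit strings -/

def pvDigsHex : Nat → Nat → List Char
  | 0, _ => []
  | w + 1, n => pvDigsHex w (n / 16) ++ [pvHexDigit (n % 16)]

theorem pvHexDigit_ok : ∀ m : Nat, m < 16 → (pvHexDigit m ≠ '+' ∧ pvHexDigit m ≠ '-') := by decide

theorem pvHexRepr_head (n : Nat) : ∃ c t, pvHexRepr n = c :: t ∧ c ≠ '+' ∧ c ≠ '-' := by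
  fun_induction pvHexRepr n with
  | case1 n h =>
    exact ⟨pvHexDigit n, [], rfl, pvHexDigit_ok n (by omega)⟩
  | case2 n h ih =>
    obtain ⟨c, t, hct, hc⟩ := ih
    exact ⟨c, t ++ [pvHexDigit (n % 16)], by rw [hct]; rfl, hc⟩

theorem pvZfill_pad (cs : List Char) (c : Char) (t : List Char) (hcs : cs = c :: t)
    (hc : c ≠ '+' ∧ c ≠ '-') (w : Nat) :
    PySem.Chars.zfill cs (w : Int) = List.replicate (w - cs.length) '0' ++ cs := by
  subst hcs
  by_cases h2 : w ≤ (c :: t).length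
  · rw [show w - (c :: t).length = 0 by omega]
    rw [PySem.Chars.zfill, if_pos (by exact_mod_cast h2)]
    simp
  · rw [PySem.Chars.zfill, if_neg (by omega)]
    show (if c = '+' ∨ c = '-' then c :: (List.replicate (((w:Int)).toNat - (c :: t).length) '0' ++ t)
      else List.replicate (((w:Int)).toNat - (c :: t).length) '0' ++ (c :: t)) = _
    rw [if_neg (by simp [hc.1, hc.2]), Int.toNat_natCast]

theorem pvDigsHex_zero (w : Nat) : pvDigsHex w 0 = List.replicate w '0' := by
  induction w with
  | zero => rfl
  | succ v ih =>
    show pvDigsHex v (0 / 16) ++ [pvHexDigit (0 % 16)] = _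
    rw [Nat.zero_div, ih, List.replicate_succ']
    rfl

theorem pvDigsHex_small (w n : Nat) (hn : n < 16) :
    pvDigsHex (w + 1) n = List.replicate w '0' ++ [pvHexDigit n] := by
  show pvDigsHex w (n / 16) ++ [pvHexDigit (n % 16)] = _
  rw [Nat.div_eq_of_lt hn, Nat.mod_eq_of_lt hn, pvDigsHex_zero]

theorem pvHexPad : ∀ w : Nat, 1 ≤ w → ∀ n : Nat, n < 16 ^ w →
    PySem.Chars.zfill (pvHexRepr n) (w : Int) = pvDigsHex w n := by
  intro w
  induction w with
  | zero => omega
  | succ v ih =>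
    intro _ n hn
    by_cases h16 : n < 16
    · rw [show pvHexRepr n = [pvHexDigit n] by rw [pvHexRepr]; simp [h16]]
      rw [pvZfill_pad _ _ _ rfl (pvHexDigit_ok n h16), pvDigsHex_small v n h16]
      simp
    · have hv : 1 ≤ v := by
        rcases Nat.eq_zero_or_pos v with h | h
        · subst h; norm_num at hn; omega
        · exact h
      have hdiv : n / 16 < 16 ^ v := by
        rw [pow_succ, Nat.mul_comm] at hn
        exact Nat.div_lt_of_lt_mul hn
      rw [show pvHexRepr n = pvHexRepr (n / 16) ++ [pvHexDigit (n % 16)] by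
        rw [pvHexRepr]; simp [h16]]
      obtain ⟨c, t, hct, hc⟩ := pvHexRepr_head (n / 16)
      rw [pvZfill_pad _ c (t ++ [pvHexDigit (n % 16)]) (by rw [hct]; rfl) hc]
      rw [show pvDigsHex (v + 1) n = pvDigsHex v (n / 16) ++ [pvHexDigit (n % 16)] from rfl]
      rw [← ih hv (n / 16) hdiv, pvZfill_pad _ c t hct hc]
      rw [hct, ← List.append_assoc]
      congr 2
      simp only [List.length_append, List.length_cons, List.length_nil]
      congr 1
      omega

theorem pvDigsHex_append (a b H : Nat) : ∀ L, L < 16 ^ b →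
    pvDigsHex (a + b) (H * 16 ^ b + L) = pvDigsHex a H ++ pvDigsHex b L := by
  induction b with
  | zero =>
    intro L hL
    have : L = 0 := by simpa using hL
    subst this
    simp [pvDigsHex]
  | succ m ih =>
    intro L hL
    show pvDigsHex (a + m) ((H * 16 ^ (m + 1) + L) / 16) ++ [pvHexDigit ((H * 16 ^ (m + 1) + L) % 16)] = _
    have hdiv : (H * 16 ^ (m + 1) + L) / 16 = H * 16 ^ m + L / 16 := by
      rw [pow_succ, ← Nat.mul_assoc, Nat.add_comm, Nat.add_mul_div_right _ _ (by norm_num : (0:Nat) < 16),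
        Nat.add_comm]
    have hmod : (H * 16 ^ (m + 1) + L) % 16 = L % 16 := by
      rw [pow_succ, show H * (16 ^ m * 16) = 16 * (H * 16 ^ m) by ring, Nat.mul_add_mod]
    have hL16 : L / 16 < 16 ^ m := by
      rw [pow_succ, Nat.mul_comm] at hL
      exact Nat.div_lt_of_lt_mul hL
    rw [hdiv, hmod, ih (L / 16) hL16]
    rw [show pvDigsHex (m + 1) L = pvDigsHex m (L / 16) ++ [pvHexDigit (L % 16)] from rfl,
      ← List.append_assoc]

theorem pvCombine (vals : List Nat) (h : ∀ v ∈ vals, v < 2 ^ 64) :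
    pvDigsHex (16 * vals.length) (pvDv (2 ^ 64) vals)
      = (vals.map (fun v => pvDigsHex 16 v)).flatten := by
  induction vals with
  | nil => simp [pvDv, pvDigsHex]
  | cons v t ih =>
    rw [pvDv_cons]
    have hpow : ((2:Nat) ^ 64) ^ t.length = 16 ^ (16 * t.length) := by
      rw [show (16:Nat) = 2 ^ 4 by norm_num, ← Nat.pow_mul, ← Nat.pow_mul]
      ring_nf
    have h1 : pvDv (2 ^ 64) t < 16 ^ (16 * t.length) := by
      rw [← hpow]
      exact pvDv_lt _ (by positivity) t (fun x hx => h x (by simp [hx]))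
    rw [show 16 * (v :: t).length = 16 + 16 * t.length by rw [List.length_cons, Nat.mul_succ]; omega]
    rw [hpow, pvDigsHex_append 16 (16 * t.length) v _ h1, ih (fun x hx => h x (by simp [hx]))]
    simp

/-! ### One 64-bit block -/

theorem pvBlock_eq (bs : List Char) (hlen : bs.length = 64) (hbits : pvIsBits bs)
    (kb : List Char) (hkb : kb ≠ []) (hkbb : pvIsBits kb) :
    pvEncBlockB (pvBitsToNat bs) ((pvGenSubkeysA kb).map pvBitsToNat)
      = pvBitsToNat (pvEncBlockA bs kb) ∧
    (pvEncBlockA bs kb).length = 64 ∧ pvIsBits (pvEncBlockA bs kb) := by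
  obtain ⟨hsk16, hsk⟩ := pvSubkeysA_facts kb hkb hkbb
  rw [pvEncBlockA, pvEncBlockB]
  have hblen : (pvPermuteA bs pvIP).length = 64 := by rw [pvPermuteA_length, pvIP_len]
  have hbbits : pvIsBits (pvPermuteA bs pvIP) := pvPermuteA_bits bs hbits pvIP
  have hv : pvPermuteB (pvBitsToNat bs) 64 pvIP = pvBitsToNat (pvPermuteA bs pvIP) := by
    rw [show (64:Nat) = bs.length from hlen.symm]
    exact pvPermuteB_eq bs hbits pvIP (by rw [hlen]; exact pvIP_bounds)
  have hL : PySem.List.slice (pvPermuteA bs pvIP) none (some 32) = (pvPermuteA bs pvIP).take 32 := by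
    rw [show (32:Int) = ((32:Nat):Int) by norm_num, PySem.List.slice_to_natCast]
  have hR : PySem.List.slice (pvPermuteA bs pvIP) (some 32) none = (pvPermuteA bs pvIP).drop 32 := by
    rw [show (32:Int) = ((32:Nat):Int) by norm_num, PySem.List.slice_from_natCast]
  have hLlen : ((pvPermuteA bs pvIP).take 32).length = 32 := by simp [hblen]
  have hRlen : ((pvPermuteA bs pvIP).drop 32).length = 32 := by simp [hblen]
  have hLbits : pvIsBits ((pvPermuteA bs pvIP).take 32) :=
    fun c hc => hbbits c (List.mem_of_mem_take hc)
  have hRbits : pvIsBits ((pvPermuteA bs pvIP).drop 32) :=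
    fun c hc => hbbits c (List.mem_of_mem_drop hc)
  have hshift : pvBitsToNat (pvPermuteA bs pvIP) >>> 32 = pvBitsToNat ((pvPermuteA bs pvIP).take 32) := by
    rw [pvBitsToNat_eq_dv, pvBitsToNat_eq_dv]
    rw [pvDv_shiftr ((pvPermuteA bs pvIP).map pvBit) (pvBits_map_le _ hbbits) 32 (by simp [hblen])]
    rw [List.map_take]
    congr 1
  have hmask : pvBitsToNat (pvPermuteA bs pvIP) &&& 0xFFFFFFFF
      = pvBitsToNat ((pvPermuteA bs pvIP).drop 32) := by
    rw [show (0xFFFFFFFF:Nat) = 2 ^ 32 - 1 by norm_num, Nat.and_two_pow_sub_one_eq_mod]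
    rw [pvBitsToNat_eq_dv, pvBitsToNat_eq_dv]
    rw [pvDv_mod ((pvPermuteA bs pvIP).map pvBit) (pvBits_map_le _ hbbits) 32 (by simp [hblen])]
    rw [List.map_drop]
    congr 1
  -- the sixteen rounds
  have hgetd : (List.range 16).foldl (fun LR i =>
        (LR.2, pvXorA LR.1 (pvFeistelA LR.2 ((pvGenSubkeysA kb).getD i []))))
        ((pvPermuteA bs pvIP).take 32, (pvPermuteA bs pvIP).drop 32)
      = (pvGenSubkeysA kb).foldl (fun LR s => (LR.2, pvXorA LR.1 (pvFeistelA LR.2 s)))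
        ((pvPermuteA bs pvIP).take 32, (pvPermuteA bs pvIP).drop 32) := by
    rw [show (16:Nat) = (pvGenSubkeysA kb).length from hsk16.symm]
    exact pvRange_foldl_getD (pvGenSubkeysA kb) []
      (fun LR s => (LR.2, pvXorA LR.1 (pvFeistelA LR.2 s))) _
  obtain ⟨r1, r2, r3, r4, r5⟩ := pvRounds (pvGenSubkeysA kb) hsk
    ((pvPermuteA bs pvIP).take 32) ((pvPermuteA bs pvIP).drop 32) hLlen hRlen hLbits hRbits
  simp only [hv, hL, hR, hshift, hmask, hgetd, r1]
  set p := (pvGenSubkeysA kb).foldl (fun LR s => (LR.2, pvXorA LR.1 (pvFeistelA LR.2 s)))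
    ((pvPermuteA bs pvIP).take 32, (pvPermuteA bs pvIP).drop 32) with hp
  have hcat : pvBitsToNat p.2 * (1 <<< 32) + pvBitsToNat p.1 = pvBitsToNat (p.2 ++ p.1) := by
    rw [pvBitsToNat_append, r2, Nat.one_shiftLeft]
  have hcatlen : (p.2 ++ p.1).length = 64 := by
    rw [List.length_append, r2, r3]
  have hcatbits : pvIsBits (p.2 ++ p.1) := by
    intro c hc
    rcases List.mem_append.1 hc with h | h
    · exact r5 c h
    · exact r4 c h
  refine ⟨?_, ?_, ?_⟩
  · rw [hcat, show (64:Nat) = (p.2 ++ p.1).length from hcatlen.symm]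
    exact pvPermuteB_eq _ hcatbits pvFP (by rw [hcatlen]; exact pvFP_bounds)
  · rw [pvPermuteA_length, pvFP_len]
  · exact pvPermuteA_bits _ hcatbits pvFP

/-! ### The outer per-block loop -/

theorem pvFoldl_append_chunks {γ : Type} (g : Nat → List γ) (acc : List γ) (n : Nat) :
    (List.range n).foldl (fun cb k => cb ++ g k) acc = acc ++ ((List.range n).map g).flatten := by
  induction n with
  | zero => simp
  | succ m ih =>
    rw [List.range_succ, List.foldl_append, List.foldl_cons, List.foldl_nil, ih,
      List.map_append, List.flatten_append]
    simp [List.append_assoc]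

theorem pvPyRange_step (c n : Nat) (hc : 0 < c) :
    PySem.List.pyRange 0 ((c * n : Nat) : Int) (c : Int)
      = (List.range n).map (fun k => ((c * k : Nat) : Int)) := by
  rw [PySem.List.pyRange_of_pos _ _ (by exact_mod_cast hc)]
  rcases Nat.eq_zero_or_pos n with h | h
  · subst h
    simp
  · have hpos : (0:Int) < ((c * n : Nat) : Int) := by
      have : 0 < c * n := Nat.mul_pos hc h
      exact_mod_cast this
    rw [if_pos hpos]
    have hcount : ((((c * n : Nat) : Int) - 0 + (c : Int) - 1) / (c : Int)).toNat = n := by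
      have h1 : (((c * n : Nat) : Int) - 0 + (c : Int) - 1) = ((c * n + c - 1 : Nat) : Int) := by
        push_cast
        omega
      rw [h1, show ((c * n + c - 1 : Nat) : Int) / (c : Int) = (((c * n + c - 1) / c : Nat) : Int) from
        (Int.natCast_ediv _ _).symm, Int.toNat_natCast]
      have : c * n + c - 1 = c * n + (c - 1) := by omega
      rw [this, Nat.mul_comm c n, Nat.add_comm, Nat.add_mul_div_right _ _ hc,
        Nat.div_eq_of_lt (by omega)]
      omega
    rw [hcount]
    apply List.map_congr_left
    intro k _
    push_cast
    ring

theorem pvChunk (bytesP : List Nat) (hv : ∀ x ∈ bytesP, x < 128) (k : Nat)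
    (h : 8 * (k + 1) ≤ bytesP.length) :
    ((pvBOB bytesP).drop (64 * k)).take 64 = pvBOB ((bytesP.drop (8 * k)).take 8) := by
  have hvt : ∀ x ∈ bytesP.take (8 * k), x < 128 := fun x hx => hv x (List.mem_of_mem_take hx)
  have hvd : ∀ x ∈ bytesP.drop (8 * k), x < 128 := fun x hx => hv x (List.mem_of_mem_drop hx)
  have hsplit : pvBOB bytesP = pvBOB (bytesP.take (8 * k)) ++ pvBOB (bytesP.drop (8 * k)) := by
    conv_lhs => rw [show bytesP = bytesP.take (8 * k) ++ bytesP.drop (8 * k) from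
      (List.take_append_drop _ _).symm]
    rw [pvBOB_append]
  have hlen1 : (pvBOB (bytesP.take (8 * k))).length = 64 * k := by
    rw [pvBOB_length _ hvt, List.length_take]
    omega
  rw [hsplit, show 64 * k = (pvBOB (bytesP.take (8 * k))).length from hlen1.symm, List.drop_left]
  have hsplit2 : pvBOB (bytesP.drop (8 * k))
      = pvBOB ((bytesP.drop (8 * k)).take 8) ++ pvBOB ((bytesP.drop (8 * k)).drop 8) := by
    conv_lhs => rw [show bytesP.drop (8 * k) = (bytesP.drop (8 * k)).take 8 ++ (bytesP.drop (8 * k)).drop 8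
      from (List.take_append_drop _ _).symm]
    rw [pvBOB_append]
  have hlen2 : (pvBOB ((bytesP.drop (8 * k)).take 8)).length = 64 := by
    rw [pvBOB_length _ (fun x hx => hvd x (List.mem_of_mem_take hx)), List.length_take,
      List.length_drop]
    omega
  rw [hsplit2, show (64:Nat) = (pvBOB ((bytesP.drop (8 * k)).take 8)).length from hlen2.symm,
    List.take_left]

theorem pvByteFold (ch : List Nat) : ch.foldl (fun b y => b * 256 + y) 0 = pvDv 256 ch := rfl

theorem pvFlatten_val (bl : List (List Char)) (h : ∀ s ∈ bl, s.length = 64 ∧ pvIsBits s) :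
    pvBitsToNat bl.flatten = pvDv (2 ^ 64) (bl.map pvBitsToNat) ∧
    bl.flatten.length = 64 * bl.length ∧ pvIsBits bl.flatten := by
  induction bl with
  | nil => exact ⟨by simp [pvBitsToNat, pvDv], by simp, by intro c hc; simp at hc⟩
  | cons s t ih =>
    obtain ⟨hs1, hs2⟩ := h s (by simp)
    obtain ⟨ih1, ih2, ih3⟩ := ih (fun u hu => h u (by simp [hu]))
    refine ⟨?_, ?_, ?_⟩
    · rw [List.flatten_cons, pvBitsToNat_append, ih1, ih2, List.map_cons, pvDv_cons,
        List.length_map, ← Nat.pow_mul]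
    · rw [List.flatten_cons, List.length_append, hs1, ih2, List.length_cons]
      ring
    · rw [List.flatten_cons]
      intro c hc
      rcases List.mem_append.1 hc with h' | h'
      · exact hs2 c h'
      · exact ih3 c h'


/-! ### Last bridging helpers and the main proof -/

theorem pvJoin_nil_flat (parts : List (List Char)) : PySem.Chars.join [] parts = parts.flatten := by
  rw [PySem.Chars.join]
  induction parts with
  | nil => rfl
  | cons s t ih =>
    cases t with
    | nil => simp [List.intercalate]
    | cons u v =>
      simp [List.intercalate] at ih ⊢
      exact ih

theorem pvBOB_zeros (p : Nat) : pvBOB (List.replicate p 0) = List.replicate (8 * p) '0' := by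
  induction p with
  | zero => rfl
  | succ m ih =>
    rw [List.replicate_succ, show pvBOB (0 :: List.replicate m 0)
      = PySem.Chars.zfill (PySem.Int.toBinChars ((0:Nat) : Int)) 8 ++ pvBOB (List.replicate m 0) from rfl]
    rw [ih, show PySem.Chars.zfill (PySem.Int.toBinChars ((0:Nat) : Int)) 8
      = List.replicate 8 '0' from by decide]
    rw [show 8 * (m + 1) = 8 + 8 * m by ring, List.replicate_add]

-- ===== VERDICT (by name: the statement is the Claim_ definition above) =====

set_option maxHeartbeats 2000000 in
theorem des_encrypt_text_spec : Claim_equal_des_encrypt_text := by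
  intro plaintext key hdom hpre
  unfold Spec_des_encrypt_text
  obtain ⟨hpt, hkey⟩ := hpre
  unfold Dom_des_encrypt_text at hdom
  rw [Bool.and_eq_true] at hdom
  obtain ⟨hd1, hd2⟩ := hdom
  have hdpt : ∀ c ∈ plaintext.toList, c.toNat < 128 := by
    intro c hc
    rw [pvDomStr, List.all_eq_true] at hd1
    have := hd1 c hc
    unfold pvDomChar at this
    simp at this
    omega
  have hdk : ∀ c ∈ key.toList, c.toNat < 128 := by
    intro c hc
    rw [pvDomStr, List.all_eq_true] at hd2
    have := hd2 c hc
    unfold pvDomChar at this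
    simp at this
    omega
  simp only [des_encrypt_text, des_encrypt_text_alt]
  set pt := plaintext.toList with hptdef
  set ky := key.toList with hkydef
  -- ===== key side =====
  have hkbmap : ky.flatMap (fun c => (List.range 8).map (fun t => (c.toNat >>> (7 - t)) &&& 1))
      = (pvTextToBits ky).map pvBit := pvKeyBits_eq ky hdk
  have hkbytes : ∀ x ∈ ky.map (fun c => c.toNat), x < 128 := by
    intro x hx
    rcases List.mem_map.1 hx with ⟨c, hc, rfl⟩
    exact hdk c hc
  have hkbA_bits : pvIsBits (pvTextToBits ky) := by
    rw [pvTextToBits_eq]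
    exact pvBOB_bits _ hkbytes
  have hkbA_len : (pvTextToBits ky).length = 8 * ky.length := by
    rw [pvTextToBits_eq, pvBOB_length _ hkbytes, List.length_map]
  have hkylen : 0 < ky.length := List.length_pos_of_ne_nil hkey
  have hkbA_ne : pvTextToBits ky ≠ [] := by
    intro h
    have := congrArg List.length h
    rw [hkbA_len, List.length_nil] at this
    omega
  -- ===== plaintext side =====
  set data0 := pt.map (fun c => c.toNat) with hdata0
  have hdv0 : ∀ x ∈ data0, x < 128 := by
    intro x hx
    rcases List.mem_map.1 hx with ⟨c, hc, rfl⟩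
    exact hdpt c hc
  have hLpt : data0.length = pt.length := List.length_map ..
  have hptlen : 0 < pt.length := List.length_pos_of_ne_nil hpt
  have hpad : (PySem.Int.mod (-(data0.length : Int)) 8).toNat = (8 - data0.length % 8) % 8 := by
    rw [PySem.Int.mod_eq_emod_of_pos (by norm_num)]
    omega
  set p := (8 - data0.length % 8) % 8 with hpdef
  set bytesP := data0 ++ List.replicate p 0 with hbytesP
  have hbpv : ∀ x ∈ bytesP, x < 128 := by
    intro x hx
    rcases List.mem_append.1 hx with h | h
    · exact hdv0 x h
    · have := List.eq_of_mem_replicate h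
      omega
  have hbpL : bytesP.length = data0.length + p := by
    rw [hbytesP, List.length_append, List.length_replicate]
  have hbplen8 : bytesP.length % 8 = 0 := by omega
  set n := bytesP.length / 8 with hndef
  have hbplen : bytesP.length = 8 * n := by omega
  have hn1 : 1 ≤ n := by omega
  have hpb : pvPad64 (pvTextToBits pt) = pvBOB bytesP := by
    rw [pvTextToBits_eq, pvPad64_eq, pvBOB_length _ hdv0]
    rw [hbytesP, pvBOB_append, pvBOB_zeros]
    congr 2
    omega
  rw [hpb, hpad, ← hbytesP]
  have hpblen : (pvBOB bytesP).length = 64 * n := by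
    rw [pvBOB_length _ hbpv]
    omega
  rw [hpblen, hbplen, hkbmap]
  -- range and fold conversions
  rw [show (64:Int) = ((64:Nat):Int) by norm_num, show (8:Int) = ((8:Nat):Int) by norm_num]
  rw [pvPyRange_step 64 n (by norm_num), pvPyRange_step 8 n (by norm_num)]
  rw [List.foldl_map, List.foldl_map]
  simp only [PySem.List.slice_natCast_add]
  rw [pvFoldl_append_chunks, PySem.List.foldl_append_singleton_eq_map]
  simp only [List.nil_append, pvByteFold]
  rw [pvSubkeysB_eq _ hkbA_ne hkbA_bits]
  -- per-block facts
  have hchunk : ∀ k, k < n → (((bytesP.drop (8*k)).take 8).length = 8 ∧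
      ∀ x ∈ (bytesP.drop (8*k)).take 8, x < 128) := by
    intro k hk
    constructor
    · rw [List.length_take, List.length_drop]
      omega
    · intro x hx
      exact hbpv x (List.mem_of_mem_drop (List.mem_of_mem_take hx))
  have hblockfacts : ∀ k, k < n →
      (pvEncBlockB (pvDv 256 ((bytesP.drop (8*k)).take 8))
          ((pvGenSubkeysA (pvTextToBits ky)).map pvBitsToNat)
        = pvBitsToNat (pvEncBlockA (pvBOB ((bytesP.drop (8*k)).take 8)) (pvTextToBits ky)) ∧
       (pvEncBlockA (pvBOB ((bytesP.drop (8*k)).take 8)) (pvTextToBits ky)).length = 64 ∧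
       pvIsBits (pvEncBlockA (pvBOB ((bytesP.drop (8*k)).take 8)) (pvTextToBits ky))) := by
    intro k hk
    obtain ⟨hc1, hc2⟩ := hchunk k hk
    have := pvBlock_eq (pvBOB ((bytesP.drop (8*k)).take 8))
      (by rw [pvBOB_length _ hc2, hc1]) (pvBOB_bits _ hc2) (pvTextToBits ky) hkbA_ne hkbA_bits
    rwa [pvBOB_value _ hc2] at this
  have hmapA : (List.range n).map (fun k =>
        pvEncBlockA (((pvBOB bytesP).drop (64*k)).take 64) (pvTextToBits ky))
      = (List.range n).map (fun k =>
        pvEncBlockA (pvBOB ((bytesP.drop (8*k)).take 8)) (pvTextToBits ky)) := by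
    apply List.map_congr_left
    intro k hk
    rw [pvChunk bytesP hbpv k (by have := List.mem_range.1 hk; omega)]
  rw [hmapA]
  set blocksA := (List.range n).map (fun k =>
    pvEncBlockA (pvBOB ((bytesP.drop (8*k)).take 8)) (pvTextToBits ky)) with hblA
  have hblfacts : ∀ s ∈ blocksA, s.length = 64 ∧ pvIsBits s := by
    intro sb hsb
    rcases List.mem_map.1 hsb with ⟨k, hk, rfl⟩
    exact (hblockfacts k (List.mem_range.1 hk)).2
  obtain ⟨hf1, hf2, hf3⟩ := pvFlatten_val blocksA hblfacts
  rw [hf1, hf2]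
  have hblAlen : blocksA.length = n := by rw [hblA, List.length_map, List.length_range]
  have hvals : ∀ v ∈ blocksA.map pvBitsToNat, v < 2 ^ 64 := by
    intro v hv
    rcases List.mem_map.1 hv with ⟨sb, hsb, rfl⟩
    obtain ⟨hl, hb⟩ := hblfacts sb hsb
    have := pvBitsToNat_lt sb hb
    rwa [hl] at this
  have hdvlt : pvDv (2 ^ 64) (blocksA.map pvBitsToNat) < 16 ^ (16 * n) := by
    have h1 := pvDv_lt (2 ^ 64) (by positivity) (blocksA.map pvBitsToNat) hvals
    have h2 : ((2:Nat) ^ 64) ^ (blocksA.map pvBitsToNat).length = 16 ^ (16 * n) := by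
      rw [List.length_map, hblAlen, show (16:Nat) = 2 ^ 4 by norm_num, ← Nat.pow_mul, ← Nat.pow_mul]
      ring_nf
    rwa [h2] at h1
  rw [show 64 * blocksA.length / 4 = 16 * n by rw [hblAlen]; omega]
  rw [pvHexPad (16 * n) (by omega) _ hdvlt]
  rw [show 16 * n = 16 * (blocksA.map pvBitsToNat).length by rw [List.length_map, hblAlen]]
  rw [pvCombine (blocksA.map pvBitsToNat) hvals]
  rw [pvJoin_nil_flat]
  congr 1
  rw [hblA, List.map_map, List.map_map]
  refine congrArg List.flatten ?_
  apply List.map_congr_left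
  intro k hk
  have hkn := List.mem_range.1 hk
  obtain ⟨hb1, hb2, hb3⟩ := hblockfacts k hkn
  simp only [Function.comp_apply]
  rw [hb1]
  have hlt : pvBitsToNat (pvEncBlockA (pvBOB ((bytesP.drop (8*k)).take 8)) (pvTextToBits ky))
      < 16 ^ 16 := by
    have := pvBitsToNat_lt _ hb3
    rw [hb2] at this
    calc pvBitsToNat (pvEncBlockA (pvBOB ((bytesP.drop (8*k)).take 8)) (pvTextToBits ky))
        < 2 ^ 64 := this
    _ = 16 ^ 16 := by norm_num
  rw [show (16:Int) = ((16:Nat):Int) by norm_num, pvHexPad 16 (by omega) _ hlt]
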